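-- pv_equiv track=rewrite | github.com/weimingwill/EasyFL | applications/mas/network_selection.py | no_task_overlap
-- ===== SOURCE A (Python) =====
-- def no_task_overlap(group, num_tasks):
--     task_set = list()
--     for combination in group.keys():
--         for task in combination.split("|"):
--             if task not in task_set:
--                 task_set.append(task)
--             else:
--                 return False
--     return len(task_set) == num_tasks
-- ===== SOURCE B (Python) =====
-- def no_task_overlap(group, num_tasks):
--     all_tasks = [task for combination in group for task in combination.split("|")]
--     return len(all_tasks) == len(set(all_tasks)) == num_tasks
-- ===== Notes on version B (the rewrite author's own statement) =====
-- stated objective: simpler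
-- what changed: Replaces the incremental membership-checked accumulator loop with early return by one flat list of all tasks and the chained length comparison len(all_tasks) == len(set(all_tasks)) == num_tasks; duplicate detection is implicit in the list-vs-set length (O(1) hashing instead of an O(n) list scan per task).
import Mathlib
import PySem

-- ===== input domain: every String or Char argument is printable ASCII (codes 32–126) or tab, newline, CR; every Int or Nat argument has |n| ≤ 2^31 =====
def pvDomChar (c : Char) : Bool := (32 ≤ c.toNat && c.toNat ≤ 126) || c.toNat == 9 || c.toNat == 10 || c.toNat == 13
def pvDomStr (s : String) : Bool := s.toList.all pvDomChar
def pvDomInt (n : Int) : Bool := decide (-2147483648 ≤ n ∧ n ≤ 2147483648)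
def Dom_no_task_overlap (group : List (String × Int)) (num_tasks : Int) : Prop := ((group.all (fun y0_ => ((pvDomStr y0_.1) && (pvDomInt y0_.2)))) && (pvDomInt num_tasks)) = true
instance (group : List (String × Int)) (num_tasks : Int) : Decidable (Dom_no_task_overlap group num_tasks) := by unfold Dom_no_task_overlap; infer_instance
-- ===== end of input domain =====

-- ===== PORT A =====
-- B replaces A's membership-checked accumulator loop with a flat list and a length comparison (objective: simpler).
-- combination.split("|"): sep "|" is nonempty, so split? is always `some`; `.getD []` is exact here.
def pvSplitBar (s : String) : List String := (PySem.Str.split? s "|").getD []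

-- inner `for task in combination.split("|")`: `none` models A's early `return False`
def pvInnerA (ts : List String) (taskSet : List String) : Option (List String) :=
  match ts with
  | [] => some taskSet
  | t :: rest =>
    if !taskSet.contains t then pvInnerA rest (taskSet ++ [t])
    else none

-- outer `for combination in group.keys()`
def pvOuterA (ks : List String) (taskSet : List String) : Option (List String) :=
  match ks with
  | [] => some taskSet
  | k :: rest =>
    match pvInnerA (pvSplitBar k) taskSet with
    | some taskSet' => pvOuterA rest taskSet'
    | none => none

def no_task_overlap (group : List (String × Int)) (num_tasks : Int) : Bool :=
  match pvOuterA (PySem.Dict.ofList group).keys [] with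
  | some taskSet => decide ((taskSet.length : Int) = num_tasks)
  | none => false

-- ===== PORT B =====
def no_task_overlap_alt (group : List (String × Int)) (num_tasks : Int) : Bool :=
  let all_tasks := (PySem.Dict.ofList group).keys.flatMap
    (fun combination => (PySem.Str.split? combination "|").getD [])
  decide ((all_tasks.length : Int) = ((PySem.Set.ofList all_tasks).length : Int)) &&
    decide (((PySem.Set.ofList all_tasks).length : Int) = num_tasks)

-- ===== PRECONDITION & SPEC =====
def Spec_no_task_overlap (group : List (String × Int)) (num_tasks : Int) (out : Bool) : Prop := out = no_task_overlap_alt group num_tasks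
instance (group : List (String × Int)) (num_tasks : Int) (out : Bool) : Decidable (Spec_no_task_overlap group num_tasks out) := by unfold Spec_no_task_overlap; infer_instance

-- ===== CLAIM (what is proved, stated in full; the proofs are below) =====
def Claim_equal_no_task_overlap : Prop := ∀ (group : List (String × Int)) (num_tasks : Int), Dom_no_task_overlap group num_tasks → Spec_no_task_overlap group num_tasks (no_task_overlap group num_tasks)

-- ===== LEMMAS AND PROOFS =====

theorem pvInnerA_eq (ts taskSet : List String) :
    pvInnerA ts taskSet =
      if ts.Nodup ∧ ∀ t ∈ ts, t ∉ taskSet then some (taskSet ++ ts) else none := by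
  induction ts generalizing taskSet with
  | nil => simp [pvInnerA]
  | cons t rest ih =>
    by_cases h : t ∈ taskSet
    · rw [if_neg]
      · simp [pvInnerA, h]
      · rintro ⟨_, hall⟩
        exact hall t List.mem_cons_self h
    · simp only [pvInnerA, List.contains_eq_mem, h, decide_false, Bool.not_false, if_true, ih]
      by_cases h1 : rest.Nodup ∧ ∀ x ∈ rest, x ∉ taskSet ++ [t]
      · rw [if_pos h1, if_pos, List.append_assoc]
        · rfl
        · obtain ⟨hn, hd⟩ := h1
          refine ⟨List.nodup_cons.mpr ⟨fun hm => (hd t hm) (by simp), hn⟩, ?_⟩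
          intro x hx
          rcases List.mem_cons.mp hx with rfl | hx
          · exact h
          · intro hxs; exact hd x hx (by simp [hxs])
      · rw [if_neg h1, if_neg]
        rintro ⟨hn, hd⟩
        apply h1
        obtain ⟨ht, hn'⟩ := List.nodup_cons.mp hn
        refine ⟨hn', fun x hx hmem => ?_⟩
        rcases List.mem_append.mp hmem with hs | hxt
        · exact hd x (List.mem_cons_of_mem _ hx) hs
        · exact ht ((List.mem_singleton.mp hxt) ▸ hx)

theorem pvOuterA_eq (ks taskSet : List String) :
    pvOuterA ks taskSet =
      (if (ks.flatMap pvSplitBar).Nodup ∧ ∀ t ∈ ks.flatMap pvSplitBar, t ∉ taskSet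
       then some (taskSet ++ ks.flatMap pvSplitBar) else none) := by
  induction ks generalizing taskSet with
  | nil => simp [pvOuterA]
  | cons k rest ih =>
    rw [pvOuterA, pvInnerA_eq]
    by_cases h1 : (pvSplitBar k).Nodup ∧ ∀ t ∈ pvSplitBar k, t ∉ taskSet
    · rw [if_pos h1]
      dsimp only
      rw [ih]
      have hcond : ((rest.flatMap pvSplitBar).Nodup ∧
            ∀ t ∈ rest.flatMap pvSplitBar, t ∉ taskSet ++ pvSplitBar k)
          ↔ (((k :: rest).flatMap pvSplitBar).Nodup ∧
            ∀ t ∈ (k :: rest).flatMap pvSplitBar, t ∉ taskSet) := by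
        obtain ⟨hnk, hdk⟩ := h1
        rw [List.flatMap_cons]
        constructor
        · rintro ⟨hnr, hall⟩
          have hdisj : ∀ a ∈ pvSplitBar k, ∀ b ∈ List.flatMap pvSplitBar rest, a ≠ b := by
            intro a hak b hbr hab
            exact hall b hbr (List.mem_append.mpr (Or.inr (hab ▸ hak)))
          refine ⟨List.nodup_append.mpr ⟨hnk, hnr, hdisj⟩, ?_⟩
          intro t ht
          rcases List.mem_append.mp ht with hmem | hmem
          · exact hdk t hmem
          · exact fun hts => hall t hmem (List.mem_append.mpr (Or.inl hts))
        · rintro ⟨hnd, hall⟩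
          obtain ⟨-, hnr, hdisj⟩ := List.nodup_append.mp hnd
          refine ⟨hnr, fun t ht hmem => ?_⟩
          rcases List.mem_append.mp hmem with hs | hk2
          · exact hall t (List.mem_append.mpr (Or.inr ht)) hs
          · exact hdisj t hk2 t ht rfl
      have hval : taskSet ++ pvSplitBar k ++ List.flatMap pvSplitBar rest =
          taskSet ++ List.flatMap pvSplitBar (k :: rest) := by
        rw [List.flatMap_cons, List.append_assoc]
      rw [if_congr hcond (congrArg some hval) rfl]
    · rw [if_neg h1, if_neg]
      simp only [List.flatMap_cons, List.nodup_append, List.mem_append]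
      rintro ⟨⟨hnk, hnr, hdisj⟩, hall⟩
      exact h1 ⟨hnk, fun t ht => hall t (Or.inl ht)⟩

theorem length_add_le (s : List String) (x : String) :
    (PySem.Set.add s x).length ≤ s.length + 1 := by
  by_cases hx : x ∈ s <;> simp [PySem.Set.add, List.contains_eq_mem, hx]

theorem foldl_add_le (xs s : List String) :
    (xs.foldl PySem.Set.add s).length ≤ s.length + xs.length := by
  induction xs generalizing s with
  | nil => simp
  | cons x xs ih =>
    calc (List.foldl PySem.Set.add (PySem.Set.add s x) xs).length
        ≤ (PySem.Set.add s x).length + xs.length := ih _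
      _ ≤ s.length + 1 + xs.length := by
          have := length_add_le s x; omega
      _ = s.length + (x :: xs).length := by simp; omega

theorem foldl_add_len (xs s : List String) :
    (xs.foldl PySem.Set.add s).length = s.length + xs.length ↔
      (xs.Nodup ∧ ∀ x ∈ xs, x ∉ s) := by
  induction xs generalizing s with
  | nil => simp
  | cons x xs ih =>
    by_cases hx : x ∈ s
    · have hadd : PySem.Set.add s x = s := by
        simp [PySem.Set.add, List.contains_eq_mem, hx]
      have hle := foldl_add_le xs s
      constructor
      · intro h
        rw [List.foldl_cons, hadd] at h
        simp at h
        omega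
      · rintro ⟨_, hall⟩
        exact absurd hx (hall x List.mem_cons_self)
    · have hadd : PySem.Set.add s x = s ++ [x] := by
        simp [PySem.Set.add, List.contains_eq_mem, hx]
      rw [List.foldl_cons, hadd]
      have hlen : s.length + (x :: xs).length = (s ++ [x]).length + xs.length := by
        simp; omega
      rw [hlen, ih]
      constructor
      · rintro ⟨hn, hall⟩
        refine ⟨List.nodup_cons.mpr ⟨fun hm => (hall x hm) (by simp), hn⟩, ?_⟩
        intro y hy
        rcases List.mem_cons.mp hy with rfl | hy
        · exact hx
        · intro hys; exact hall y hy (by simp [hys])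
      · rintro ⟨hn, hall⟩
        obtain ⟨hxs, hn'⟩ := List.nodup_cons.mp hn
        refine ⟨hn', fun y hy hmem => ?_⟩
        rcases List.mem_append.mp hmem with hs | hyx
        · exact hall y (List.mem_cons_of_mem _ hy) hs
        · exact hxs ((List.mem_singleton.mp hyx) ▸ hy)

theorem length_ofList_eq_iff (xs : List String) :
    (PySem.Set.ofList xs).length = xs.length ↔ xs.Nodup := by
  rw [PySem.Set.ofList_eq_foldl, show xs.length = ([] : List String).length + xs.length by simp,
    foldl_add_len]
  simp

-- ===== VERDICT (by name: the statement is the Claim_ definition above) =====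
theorem no_task_overlap_spec : Claim_equal_no_task_overlap := by
  intro group num_tasks _
  unfold Spec_no_task_overlap no_task_overlap no_task_overlap_alt
  have hb : (fun combination => (PySem.Str.split? combination "|").getD []) = pvSplitBar := rfl
  rw [hb, pvOuterA_eq]
  dsimp only
  set F := (PySem.Dict.ofList group).keys.flatMap pvSplitBar with hF
  by_cases hnd : F.Nodup
  · rw [if_pos ⟨hnd, by simp⟩]
    rw [PySem.Set.ofList_eq_self_of_nodup _ hnd]
    simp
  · rw [if_neg (by tauto)]
    have : (PySem.Set.ofList F).length ≠ F.length := by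
      intro h; exact hnd ((length_ofList_eq_iff F).mp h)
    rw [show (decide ((F.length : Int) = ((PySem.Set.ofList F).length : Int))) = false by
      simp; omega]
    simp
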